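-- pv_equiv track=rewrite | github.com/apostlez/algorithm-Exams | 2024q1/sun copy.py | linear
-- ===== SOURCE A (Python) =====
-- def linear(n, b, c, p, f, d):
--     battery = b
--     cost = 0
--     for i in range(n-1):
--         if battery >= d[i] and battery + sum(p[i+1:]) - sum(d[i+1:]) > b and f[i] * d[i] >= f[i+1] * d[i+1]:
--             battery -= d[i]
--         else:
--             battery += p[i]
--             if battery > c:
--                 battery = c
--             cost += f[i] * d[i]
--     if battery - d[n-1] >= b:
--         return cost
--     else:
--         return cost + f[n-1] * d[n-1]
-- ===== SOURCE B (Python) =====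
-- def linear(n, b, c, p, f, d):
--     lp, ld = len(p), len(d)
--     sp = [0] * (lp + 1)
--     for i in range(lp - 1, -1, -1):
--         sp[i] = sp[i + 1] + p[i]
--     sd = [0] * (ld + 1)
--     for i in range(ld - 1, -1, -1):
--         sd[i] = sd[i + 1] + d[i]
--     battery, cost = b, 0
--     i = 0
--     while i < n - 1:
--         fd = f[i] * d[i]
--         if battery >= d[i] and battery + sp[min(i + 1, lp)] - sd[min(i + 1, ld)] > b and fd >= f[i + 1] * d[i + 1]:
--             battery -= d[i]
--         else:
--             battery = min(battery + p[i], c)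
--             cost += fd
--         i += 1
--     return cost if battery - d[n - 1] >= b else cost + f[n - 1] * d[n - 1]
-- ===== Notes on version B (the rewrite author's own statement) =====
-- stated objective: alternative
-- what changed: A recomputes sum(p[i+1:]) and sum(d[i+1:]) with fresh slices inside the loop; B precomputes the two suffix-sum tables once in a backward pass and the forward simulation reads them by (clamped) index, written as a while loop with min() instead of A's for-loop with a clamp-if.
-- outside the precondition, e.g. on linear(2, 10, 10, [], [1, 0], [1, -5]): A returns 0, B returns 0
import Mathlib
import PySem

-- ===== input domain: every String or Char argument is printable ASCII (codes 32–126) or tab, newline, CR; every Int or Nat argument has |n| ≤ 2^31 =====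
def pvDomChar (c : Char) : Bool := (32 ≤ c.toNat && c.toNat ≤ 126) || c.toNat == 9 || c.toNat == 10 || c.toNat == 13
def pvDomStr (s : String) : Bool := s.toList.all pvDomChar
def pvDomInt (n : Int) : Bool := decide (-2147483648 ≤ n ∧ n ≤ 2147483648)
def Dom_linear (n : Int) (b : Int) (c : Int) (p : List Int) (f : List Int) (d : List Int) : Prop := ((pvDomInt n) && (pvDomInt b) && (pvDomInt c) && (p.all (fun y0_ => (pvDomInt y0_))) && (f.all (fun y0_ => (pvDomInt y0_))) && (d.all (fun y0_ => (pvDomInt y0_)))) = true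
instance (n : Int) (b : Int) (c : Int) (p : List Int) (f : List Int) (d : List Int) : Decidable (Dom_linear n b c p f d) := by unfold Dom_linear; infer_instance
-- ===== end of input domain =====

-- B replaces A's per-iteration slice sums sum(p[i+1:]) / sum(d[i+1:]) by two suffix-sum
-- tables built once in a backward pass, read by clamped index inside a while-style loop
-- (objective: alternative; return value only, no observable mutation in either program).

-- ===== PORT A =====
def linear (n : Int) (b : Int) (c : Int) (p : List Int) (f : List Int) (d : List Int) : Int :=
  let st := (PySem.List.pyRange 0 (n - 1) 1).foldl (fun (s : Int × Int) i =>
    if s.1 ≥ PySem.List.pyGetD d i 0 ∧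
       s.1 + (PySem.List.slice p (some (i + 1)) none).sum
           - (PySem.List.slice d (some (i + 1)) none).sum > b ∧
       PySem.List.pyGetD f i 0 * PySem.List.pyGetD d i 0 ≥
         PySem.List.pyGetD f (i + 1) 0 * PySem.List.pyGetD d (i + 1) 0 then
      (s.1 - PySem.List.pyGetD d i 0, s.2)
    else
      let battery := s.1 + PySem.List.pyGetD p i 0
      let battery := if battery > c then c else battery
      (battery, s.2 + PySem.List.pyGetD f i 0 * PySem.List.pyGetD d i 0)) (b, 0)
  if st.1 - PySem.List.pyGetD d (n - 1) 0 ≥ b then st.2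
  else st.2 + PySem.List.pyGetD f (n - 1) 0 * PySem.List.pyGetD d (n - 1) 0

-- ===== PORT B =====
-- Source B fills sp right-to-left by sp[i] = sp[i+1] + p[i]; structurally that is this
-- right-to-left recursion (head of the already-built tail = sp[i+1]).
def pvSuf : List Int → List Int
  | [] => [0]
  | x :: t => (x + (pvSuf t).headD 0) :: pvSuf t

-- Source B's while-loop: fuel = number of remaining iterations, i the Python loop counter.
def pvGo (b c : Int) (p f d sp sd : List Int) :
    Nat → Int → Int → Int → Int × Int
  | 0, _, battery, cost => (battery, cost)
  | k + 1, i, battery, cost =>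
    let fd := PySem.List.pyGetD f i 0 * PySem.List.pyGetD d i 0
    if battery ≥ PySem.List.pyGetD d i 0 ∧
       battery + PySem.List.pyGetD sp (min (i + 1) (p.length : Int)) 0
               - PySem.List.pyGetD sd (min (i + 1) (d.length : Int)) 0 > b ∧
       fd ≥ PySem.List.pyGetD f (i + 1) 0 * PySem.List.pyGetD d (i + 1) 0 then
      pvGo b c p f d sp sd k (i + 1) (battery - PySem.List.pyGetD d i 0) cost
    else
      pvGo b c p f d sp sd k (i + 1) (min (battery + PySem.List.pyGetD p i 0) c) (cost + fd)

def linear_alt (n : Int) (b : Int) (c : Int) (p : List Int) (f : List Int) (d : List Int) : Int :=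
  let sp := pvSuf p
  let sd := pvSuf d
  let st := pvGo b c p f d sp sd (n - 1).toNat 0 b 0
  if st.1 - PySem.List.pyGetD d (n - 1) 0 ≥ b then st.2
  else st.2 + PySem.List.pyGetD f (n - 1) 0 * PySem.List.pyGetD d (n - 1) 0

-- ===== PRECONDITION & SPEC =====
-- Pre_ restricts to the problem's natural shape (n ≥ 1 with n-1 ≤ len p, n ≤ len f, n ≤ len d;
-- or the degenerate n ≤ 0 where only the final negative-index reads d[n-1], f[n-1] happen):
-- outside it A raises IndexError unless the greedy branch happens to skip every out-of-range
-- p[i] read — a path-dependent domain no closed form states; B agrees with A wherever A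
-- returns even there (see the cite).
def Pre_linear (n : Int) (b : Int) (c : Int) (p : List Int) (f : List Int) (d : List Int) : Prop :=
  (1 ≤ n ∧ n - 1 ≤ (p.length : Int) ∧ n ≤ (f.length : Int) ∧ n ≤ (d.length : Int)) ∨
  (n ≤ 0 ∧ 1 - n ≤ (f.length : Int) ∧ 1 - n ≤ (d.length : Int))
instance (n : Int) (b : Int) (c : Int) (p : List Int) (f : List Int) (d : List Int) : Decidable (Pre_linear n b c p f d) := by unfold Pre_linear; infer_instance
def pvWitness_linear : Int × Int × Int × List Int × List Int × List Int := (2, 5, 10, [3, 4], [1, 2], [2, 1])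
def Spec_linear (n : Int) (b : Int) (c : Int) (p : List Int) (f : List Int) (d : List Int) (out : Int) : Prop := out = linear_alt n b c p f d
instance (n : Int) (b : Int) (c : Int) (p : List Int) (f : List Int) (d : List Int) (out : Int) : Decidable (Spec_linear n b c p f d out) := by unfold Spec_linear; infer_instance

-- ===== CLAIM =====
def Claim_equal_linear : Prop := ∀ (n : Int) (b : Int) (c : Int) (p : List Int) (f : List Int) (d : List Int), Dom_linear n b c p f d → Pre_linear n b c p f d → Spec_linear n b c p f d (linear n b c p f d)

-- ===== LEMMAS AND PROOFS =====

theorem pvSuf_eq (xs : List Int) :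
    pvSuf xs = (List.range (xs.length + 1)).map (fun k => (xs.drop k).sum) := by
  induction xs with
  | nil => simp [pvSuf]
  | cons y t ih =>
      have hs : (pvSuf t).headD 0 = t.sum := by
        rw [ih, List.range_succ_eq_map, List.map_cons]; simp
      rw [pvSuf, hs, ih]
      conv_rhs => rw [show (y :: t).length + 1 = t.length + 1 + 1 from rfl,
        List.range_succ_eq_map, List.map_cons, List.map_map]
      rfl

theorem pvSuf_get (xs : List Int) (i : Int) (h0 : 0 ≤ i) (h1 : i ≤ (xs.length : Int)) :
    PySem.List.pyGetD (pvSuf xs) i 0 = (xs.drop i.toNat).sum := by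
  rw [pvSuf_eq, PySem.List.pyGetD_eq_getElem _ 0 h0 (by simp; omega)]
  simp

-- The while-loop with precomputed tables equals A's slice-summing fold over the same range.
theorem pvGo_eq_foldl (b c : Int) (p f d : List Int) (k : Nat) :
    ∀ (i battery cost : Int), 0 ≤ i → i + (k : Int) ≤ (p.length : Int) →
      i + (k : Int) ≤ (d.length : Int) →
    pvGo b c p f d (pvSuf p) (pvSuf d) k i battery cost =
      (PySem.List.pyRange i (i + (k : Int)) 1).foldl (fun (s : Int × Int) i =>
        if s.1 ≥ PySem.List.pyGetD d i 0 ∧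
           s.1 + (PySem.List.slice p (some (i + 1)) none).sum
               - (PySem.List.slice d (some (i + 1)) none).sum > b ∧
           PySem.List.pyGetD f i 0 * PySem.List.pyGetD d i 0 ≥
             PySem.List.pyGetD f (i + 1) 0 * PySem.List.pyGetD d (i + 1) 0 then
          (s.1 - PySem.List.pyGetD d i 0, s.2)
        else
          let battery := s.1 + PySem.List.pyGetD p i 0
          let battery := if battery > c then c else battery
          (battery, s.2 + PySem.List.pyGetD f i 0 * PySem.List.pyGetD d i 0)) (battery, cost) := by
  induction k with
  | zero =>
      intro i battery cost h0 hp hd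
      rw [show i + ((0 : Nat) : Int) = i from by simp, PySem.List.pyRange_one_eq_nil le_rfl]
      rfl
  | succ k ih =>
      intro i battery cost h0 hp hd
      have hsp : PySem.List.pyGetD (pvSuf p) (min (i + 1) (p.length : Int)) 0 =
          (PySem.List.slice p (some (i + 1)) none).sum := by
        rw [show min (i + 1) (p.length : Int) = i + 1 from by push_cast at hp; omega,
            pvSuf_get p (i + 1) (by omega) (by push_cast at hp ⊢; omega),
            PySem.List.slice_from p (by omega)]
      have hsd : PySem.List.pyGetD (pvSuf d) (min (i + 1) (d.length : Int)) 0 =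
          (PySem.List.slice d (some (i + 1)) none).sum := by
        rw [show min (i + 1) (d.length : Int) = i + 1 from by push_cast at hd; omega,
            pvSuf_get d (i + 1) (by omega) (by push_cast at hd ⊢; omega),
            PySem.List.slice_from d (by omega)]
      have e : i + ((k + 1 : Nat) : Int) = i + 1 + (k : Int) := by push_cast; ring
      have hp' : i + 1 + (k : Int) ≤ (p.length : Int) := by rw [← e]; exact hp
      have hd' : i + 1 + (k : Int) ≤ (d.length : Int) := by rw [← e]; exact hd
      rw [e, PySem.List.pyRange_one_cons (by omega), List.foldl_cons, pvGo]
      simp only [hsp, hsd]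
      split_ifs with h h2
      · rw [ih (i + 1) _ _ (by omega) hp' hd']
      · rw [ih (i + 1) _ _ (by omega) hp' hd', min_eq_right (le_of_lt h2)]
      · rw [ih (i + 1) _ _ (by omega) hp' hd', min_eq_left (by omega)]

-- ===== VERDICT =====
theorem linear_spec : Claim_equal_linear := by
  intro n b c p f d _ hpre
  unfold Spec_linear linear linear_alt
  dsimp only
  rcases hpre with ⟨hn, hp, hf, hd⟩ | ⟨hn, hf, hd⟩
  · have hk : ((n - 1).toNat : Int) = n - 1 := Int.toNat_of_nonneg (by omega)
    rw [pvGo_eq_foldl b c p f d (n - 1).toNat 0 b 0 le_rfl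
        (by rw [hk]; omega) (by rw [hk]; omega)]
    rw [show (0 : Int) + (((n - 1).toNat : Nat) : Int) = n - 1 from by rw [hk]; ring]
  · rw [show (n - 1).toNat = 0 from by omega,
        PySem.List.pyRange_one_eq_nil (show n - 1 ≤ 0 by omega)]
    rfl
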